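-- pv_equiv track=rewrite | github.com/trihoangdev/python-28tech | contest-03/ex21.py | check
-- ===== SOURCE A (Python) =====
-- from math import isqrt
--
-- def check(n):
--     i = 2
--     while i <= isqrt(n):
--         cnt = 0
--         if n % i == 0:
--             while n % i == 0:
--                 cnt += 1
--                 n //= i
--                 if cnt == 2:
--                     return True
--         i += 1
--     return False
-- ===== SOURCE B (Python) =====
-- from math import isqrt
--
-- def check(n):
--     return any(n % (d * d) == 0 for d in range(2, isqrt(n) + 1))
-- ===== Notes on version B (the rewrite author's own statement) =====
-- stated objective: simpler
-- what changed: A trial-divides n, extracting prime factors with a nested counting loop and mutating n; B never factors or mutates anything: it is a one-line scan testing n % (d*d) == 0 for every d in range(2, isqrt(n)+1), correct because n has a squared prime factor iff some d >= 2 with d*d <= n has d*d | n.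
import Mathlib
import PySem

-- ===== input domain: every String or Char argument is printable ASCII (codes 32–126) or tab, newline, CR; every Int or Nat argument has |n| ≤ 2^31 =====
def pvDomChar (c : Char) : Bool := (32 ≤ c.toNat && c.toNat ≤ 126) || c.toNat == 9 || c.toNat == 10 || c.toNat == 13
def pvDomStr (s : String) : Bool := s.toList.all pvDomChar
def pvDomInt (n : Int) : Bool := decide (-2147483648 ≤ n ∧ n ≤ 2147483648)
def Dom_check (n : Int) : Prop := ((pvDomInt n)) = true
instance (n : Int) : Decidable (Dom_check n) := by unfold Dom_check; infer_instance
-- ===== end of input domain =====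

-- B drops A's factor-extraction loop entirely: it scans every d in range(2, isqrt(n)+1) and
-- tests d*d | n directly, never mutating n (objective: simpler/idiomatic).
-- Both Pythons raise ValueError (math.isqrt) on n < 0; Pre_check excludes exactly those inputs.

-- math.isqrt, exact for n ≥ 0 (n < 0 raises in Python and is outside Pre_check)
def pyIsqrt (n : Int) : Int := (Nat.sqrt n.toNat : Int)

theorem pyIsqrt_floordiv_le (n i : Int) (hi : 2 ≤ i) (hg : i ≤ pyIsqrt n) :
    pyIsqrt (PySem.Int.floordiv n i) ≤ pyIsqrt n := by
  have hn : (4 : Nat) ≤ n.toNat := by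
    have h2 : (2 : Nat) ≤ Nat.sqrt n.toNat := by
      have := hg; unfold pyIsqrt at this; omega
    calc (4 : Nat) = 2 * 2 := rfl
    _ ≤ Nat.sqrt n.toNat * Nat.sqrt n.toNat := Nat.mul_le_mul h2 h2
    _ ≤ n.toNat := by simpa [pow_two] using Nat.sqrt_le' n.toNat
  have hn0 : (0 : Int) ≤ n := by omega
  have hfd : PySem.Int.floordiv n i = n / i := PySem.Int.floordiv_eq_ediv_of_pos (by omega)
  have h1 : (0 : Int) ≤ n / i := Int.ediv_nonneg hn0 (by omega)
  have h2 : n / i ≤ n := Int.ediv_le_self _ hn0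
  unfold pyIsqrt
  have : (PySem.Int.floordiv n i).toNat ≤ n.toNat := by rw [hfd]; omega
  exact_mod_cast Nat.sqrt_le_sqrt this

-- ===== PORT A =====
-- A's outer while-loop; the loop variable i = 2 + k (i starts at 2 and only increments, k : Nat drives
-- the recursion).  A's inner `while n % i == 0` loop is transcribed by unrolling: its `if cnt == 2:
-- return True` makes it run at most two iterations (return True on the second, or exit after the first
-- with n //= i done once and then i += 1).
def checkLoop (n : Int) (k : Nat) : Bool :=
  if hg : 2 + (k : Int) ≤ pyIsqrt n then
    if PySem.Int.mod n (2 + (k : Int)) == 0 then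
      -- inner loop, 1st iteration: cnt = 1, n //= i
      if PySem.Int.mod (PySem.Int.floordiv n (2 + (k : Int))) (2 + (k : Int)) == 0 then
        true  -- 2nd iteration: cnt = 2 → return True
      else
        checkLoop (PySem.Int.floordiv n (2 + (k : Int))) (k + 1)  -- exit inner loop, i += 1
    else
      checkLoop n (k + 1)
  else
    false
termination_by (pyIsqrt n + 1 - (2 + k)).toNat
decreasing_by
  · have := pyIsqrt_floordiv_le n (2 + k) (by omega) hg; omega
  · omega

def check (n : Int) : Bool := checkLoop n 0

-- ===== PORT B =====
-- B: any(n % (d*d) == 0 for d in range(2, isqrt(n)+1)) — one pass, no mutation of n.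
def check_alt (n : Int) : Bool :=
  (PySem.List.pyRange 2 (pyIsqrt n + 1) 1).any (fun d => PySem.Int.mod n (d * d) == 0)

-- ===== PRECONDITION & SPEC =====
-- math.isqrt(n) raises ValueError for n < 0 (in both A and B), so Pre_ is 0 ≤ n.
def Pre_check (n : Int) : Prop := 0 ≤ n
instance (n : Int) : Decidable (Pre_check n) := by unfold Pre_check; infer_instance
def pvWitness_check : Int := (12)

def Spec_check (n : Int) (out : Bool) : Prop := out = check_alt n
instance (n : Int) (out : Bool) : Decidable (Spec_check n out) := by unfold Spec_check; infer_instance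

-- ===== CLAIM (what is proved, stated in full; the proofs are below) =====
def Claim_equal_check : Prop := ∀ (n : Int), Dom_check n → Pre_check n → Spec_check n (check n)

-- ===== LEMMAS AND PROOFS =====

theorem dvd_sq_iff (n i : Int) (hi : 0 < i) :
    i * i ∣ n ↔ (i ∣ n ∧ i ∣ n / i) := by
  constructor
  · rintro ⟨m, rfl⟩
    refine ⟨⟨i * m, by ring⟩, ?_⟩
    rw [mul_assoc, Int.mul_ediv_cancel_left _ (by omega)]
    exact ⟨m, rfl⟩
  · rintro ⟨⟨a, rfl⟩, hd⟩
    rw [Int.mul_ediv_cancel_left _ (by omega)] at hd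
    obtain ⟨b, rfl⟩ := hd
    exact ⟨b, by ring⟩

-- bracket for the isqrt bound
theorem le_pyIsqrt_iff (n d : Int) (hn : 0 ≤ n) (hd : 0 ≤ d) :
    d ≤ pyIsqrt n ↔ d * d ≤ n := by
  unfold pyIsqrt
  have h := Nat.le_sqrt (m := d.toNat) (n := n.toNat)
  constructor
  · intro hle
    have h1 : d.toNat ≤ Nat.sqrt n.toNat := by omega
    have h2 : d.toNat * d.toNat ≤ n.toNat := h.1 h1
    have : d * d = ((d.toNat * d.toNat : Nat) : Int) := by
      push_cast [Int.toNat_of_nonneg hd]; ring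
    omega
  · intro hle
    have h2 : d.toNat * d.toNat ≤ n.toNat := by
      have : d * d = ((d.toNat * d.toNat : Nat) : Int) := by
        push_cast [Int.toNat_of_nonneg hd]; ring
      omega
    have := h.2 h2
    omega

-- a ∣ b over ℤ transfers to toNat for nonnegative a, b
theorem dvd_toNat_iff (a b : Int) (ha : 0 ≤ a) (hb : 0 ≤ b) :
    a ∣ b ↔ a.toNat ∣ b.toNat := by
  rw [← Int.natCast_dvd_natCast, Int.toNat_of_nonneg ha, Int.toNat_of_nonneg hb]

-- the key number-theoretic step: with n's smallest factor i prime and i∤(n/i),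
-- any square divisor d² of n with i < d already divides n/i
theorem sq_dvd_quot (n i d : Int) (hi : 2 ≤ i) (hin : i ∣ n) (hn : 0 < n)
    (hprime : Nat.Prime i.toNat) (hnotsq : ¬ i ∣ n / i) (hid : i < d) (hdn : d * d ∣ n) :
    d * d ∣ n / i := by
  have hd0 : (0 : Int) ≤ d := by omega
  have hq0 : (0 : Int) ≤ n / i := Int.ediv_nonneg (by omega) (by omega)
  have hnid : ¬ i ∣ d := by
    intro h
    exact hnotsq ((dvd_sq_iff n i (by omega)).1 (dvd_trans (mul_dvd_mul h h) hdn)).2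
  -- move to ℕ
  have hI : ¬ i.toNat ∣ d.toNat := by
    rw [← dvd_toNat_iff i d (by omega) hd0] at *; exact hnid
  have hcop1 : Nat.Coprime d.toNat i.toNat :=
    ((Nat.Prime.coprime_iff_not_dvd hprime).2 hI).symm
  have hcop : Nat.Coprime (d.toNat * d.toNat) i.toNat := Nat.Coprime.mul_left hcop1 hcop1
  have hfac : n = i * (n / i) := (Int.mul_ediv_cancel' hin).symm
  have htm : (d * d).toNat = d.toNat * d.toNat := Int.toNat_mul hd0 hd0
  have htm2 : (i * (n / i)).toNat = i.toNat * (n / i).toNat := Int.toNat_mul (by omega) hq0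
  have hddN : d.toNat * d.toNat ∣ i.toNat * (n / i).toNat := by
    have h1 : d * d ∣ i * (n / i) := hfac ▸ hdn
    have h2 := (dvd_toNat_iff (d * d) (i * (n / i)) (by positivity) (by positivity)).1 h1
    rwa [htm, htm2] at h2
  have hfin : d.toNat * d.toNat ∣ (n / i).toNat :=
    Nat.Coprime.dvd_of_dvd_mul_left hcop hddN
  exact (dvd_toNat_iff (d * d) (n / i) (by positivity) hq0).2 (htm ▸ hfin)

-- characterization of A's loop: starting at i = 2+k with no divisor of n below i,
-- it returns true iff some d with i ≤ d ≤ isqrt n has d² ∣ n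
-- n's smallest divisor ≥ 2 is prime
theorem prime_of_min_divisor (n i : Int) (hi : 2 ≤ i) (hin : i ∣ n)
    (H : ∀ d : Int, 2 ≤ d → d < i → ¬ d ∣ n) : Nat.Prime i.toNat := by
  rw [Nat.prime_def_lt]
  refine ⟨by omega, ?_⟩
  intro m hm hdvd
  by_contra hne
  have hm0 : m ≠ 0 := by
    rintro rfl
    have := Nat.eq_zero_of_zero_dvd hdvd
    omega
  have hm2 : 2 ≤ m := by omega
  have hmi : (m : Int) ∣ i := by
    rw [dvd_toNat_iff (m : Int) i (by positivity) (by omega), Int.toNat_natCast]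
    exact hdvd
  exact H (m : Int) (by exact_mod_cast hm2) (by omega) (dvd_trans hmi hin)

-- characterization of A's loop: starting at i = 2+k with no divisor of n below i,
-- it returns true iff some d with i ≤ d ≤ isqrt n has d² ∣ n
theorem A_char : ∀ (n : Int) (k : Nat), 0 ≤ n →
    (∀ d : Int, 2 ≤ d → d < 2 + (k : Int) → ¬ d ∣ n) →
    (checkLoop n k = true ↔ ∃ d : Int, 2 + (k : Int) ≤ d ∧ d ≤ pyIsqrt n ∧ d * d ∣ n) := by
  intro n k
  induction n, k using checkLoop.induct with
  | case1 n k hg hmod hmod2 =>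
    intro hn H
    have hi0 : (0:Int) < 2 + (k:Int) := by omega
    have hfd : PySem.Int.floordiv n (2+(k:Int)) = n / (2+(k:Int)) :=
      PySem.Int.floordiv_eq_ediv_of_pos hi0
    have h1 : (2+(k:Int)) ∣ n := (PySem.Int.mod_eq_zero_iff_dvd n _).1 (by simpa using hmod)
    have h2 : (2+(k:Int)) ∣ n / (2+(k:Int)) :=
      (PySem.Int.mod_eq_zero_iff_dvd _ _).1 (by rw [← hfd]; simpa using hmod2)
    rw [checkLoop]
    simp only [hg, dif_pos, hmod, hmod2, if_true, true_iff]
    exact ⟨2+(k:Int), le_refl _, hg, (dvd_sq_iff n _ hi0).2 ⟨h1, h2⟩⟩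
  | case2 n k hg hmod hmod2 ih =>
    intro hn H
    have hi0 : (0:Int) < 2 + (k:Int) := by omega
    have hfd : PySem.Int.floordiv n (2+(k:Int)) = n / (2+(k:Int)) :=
      PySem.Int.floordiv_eq_ediv_of_pos hi0
    have h1 : (2+(k:Int)) ∣ n := (PySem.Int.mod_eq_zero_iff_dvd n _).1 (by simpa using hmod)
    have hnotsq : ¬ (2+(k:Int)) ∣ n / (2+(k:Int)) := by
      intro hd
      have : PySem.Int.mod (PySem.Int.floordiv n (2+(k:Int))) (2+(k:Int)) = 0 := by
        rw [hfd]; exact (PySem.Int.mod_eq_zero_iff_dvd _ _).2 hd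
      simp [this] at hmod2
    have hn4 : (4:Int) ≤ n := (le_pyIsqrt_iff n 2 hn (by omega)).1 (by omega)
    have hq0 : (0:Int) ≤ n / (2+(k:Int)) := Int.ediv_nonneg (by omega) (by omega)
    have hfac : n = (2+(k:Int)) * (n / (2+(k:Int))) := (Int.mul_ediv_cancel' h1).symm
    have hqd : n / (2+(k:Int)) ∣ n := by
      conv_rhs => rw [hfac]
      exact dvd_mul_left _ _
    have hprime : Nat.Prime (2+(k:Int)).toNat :=
      prime_of_min_divisor n (2+(k:Int)) (by omega) h1 (fun d hd2 hdlt => H d hd2 hdlt)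
    have H2 : ∀ d : Int, 2 ≤ d → d < 2 + ((k+1 : Nat):Int) → ¬ d ∣ n / (2+(k:Int)) := by
      intro d hd2 hdlt hdvd
      by_cases hde : d = 2+(k:Int)
      · exact hnotsq (hde ▸ hdvd)
      · exact H d hd2 (by push_cast at hdlt ⊢; omega) (dvd_trans hdvd hqd)
    rw [Bool.not_eq_true] at hmod2
    rw [checkLoop]
    simp only [hg, dif_pos, hmod, hmod2, if_true, Bool.false_eq_true, if_false]
    rw [ih (by rw [hfd]; exact hq0) (by rw [hfd]; exact H2)]
    rw [hfd]
    constructor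
    · rintro ⟨d, hd1, hd2, hd3⟩
      refine ⟨d, by push_cast at hd1 ⊢; omega, ?_, dvd_trans hd3 hqd⟩
      calc d ≤ pyIsqrt (n / (2+(k:Int))) := hd2
        _ = pyIsqrt (PySem.Int.floordiv n (2+(k:Int))) := by rw [hfd]
        _ ≤ pyIsqrt n := pyIsqrt_floordiv_le n _ (by omega) hg
    · rintro ⟨d, hd1, hd2, hd3⟩
      have hdne : d ≠ 2+(k:Int) := by
        intro hde
        exact hnotsq ((dvd_sq_iff n _ hi0).1 (hde ▸ hd3)).2
      have hid : 2+(k:Int) < d := by omega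
      have hsq : d * d ∣ n / (2+(k:Int)) :=
        sq_dvd_quot n (2+(k:Int)) d (by omega) h1 (by omega) hprime hnotsq hid hd3
      have hqpos : (0:Int) < n / (2+(k:Int)) := by
        have : (1:Int) ≤ n / (2+(k:Int)) :=
          Int.le_ediv_iff_mul_le hi0 |>.2 (by
            have : pyIsqrt n ≤ n := by
              unfold pyIsqrt
              have := Nat.sqrt_le_self n.toNat
              omega
            omega)
        omega
      refine ⟨d, by push_cast; omega, ?_, hsq⟩
      exact (le_pyIsqrt_iff _ d hq0 (by omega)).2 (Int.le_of_dvd hqpos hsq)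
  | case3 n k hg hmod ih =>
    intro hn H
    have hnd : ¬ (2+(k:Int)) ∣ n := by
      intro hd
      have : PySem.Int.mod n (2+(k:Int)) = 0 := (PySem.Int.mod_eq_zero_iff_dvd n _).2 hd
      simp [this] at hmod
    have H2 : ∀ d : Int, 2 ≤ d → d < 2 + ((k+1 : Nat):Int) → ¬ d ∣ n := by
      intro d hd2 hdlt hdvd
      by_cases hde : d = 2+(k:Int)
      · exact hnd (hde ▸ hdvd)
      · exact H d hd2 (by push_cast at hdlt ⊢; omega) hdvd
    rw [Bool.not_eq_true] at hmod
    rw [checkLoop]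
    simp only [hg, dif_pos, hmod, Bool.false_eq_true, if_false]
    rw [ih hn H2]
    constructor
    · rintro ⟨d, hd1, hd2, hd3⟩
      exact ⟨d, by push_cast at hd1 ⊢; omega, hd2, hd3⟩
    · rintro ⟨d, hd1, hd2, hd3⟩
      have hdne : d ≠ 2+(k:Int) := by
        intro hde
        exact hnd (dvd_trans (Dvd.intro d (by rw [hde])) (hde ▸ hd3))
      exact ⟨d, by push_cast; omega, hd2, hd3⟩
  | case4 n k hg =>
    intro hn H
    rw [checkLoop, dif_neg hg]
    simp only [Bool.false_eq_true, false_iff]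
    rintro ⟨d, hd1, hd2, hd3⟩
    exact hg (by omega)

theorem B_char (n : Int) : check_alt n = true ↔
    ∃ d : Int, 2 ≤ d ∧ d ≤ pyIsqrt n ∧ d * d ∣ n := by
  unfold check_alt
  rw [List.any_eq_true]
  constructor
  · rintro ⟨d, hmem, hp⟩
    rw [PySem.List.mem_pyRange_one] at hmem
    exact ⟨d, hmem.1, by omega, (PySem.Int.mod_eq_zero_iff_dvd n (d * d)).1 (by simpa using hp)⟩
  · rintro ⟨d, h2, hle, hdvd⟩
    exact ⟨d, PySem.List.mem_pyRange_one.2 ⟨h2, by omega⟩,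
      by simpa using (PySem.Int.mod_eq_zero_iff_dvd n (d * d)).2 hdvd⟩

-- ===== VERDICT (by name: the statement is the Claim_ definition above) =====
theorem check_spec : Claim_equal_check := by
  intro n _ hn
  unfold Spec_check check
  have hA := A_char n 0 hn (by intro d h1 h2 _; omega)
  have hB := B_char n
  simp only [Nat.cast_zero, add_zero] at hA
  cases hcb : check_alt n with
  | true => exact hA.2 (hB.1 hcb)
  | false =>
    cases hca : checkLoop n 0 with
    | false => rfl
    | true => exact absurd (hB.2 (hA.1 hca)) (by simp [hcb])
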